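-- pv_equiv track=rewrite | github.com/ericchou1/tps-collection | aGalaxy-TPS/aG-auto-incident-integration-v4/a10_functions.py | find_mitigation_temp_id_for_dest_entry
-- ===== SOURCE A (Python) =====
-- def find_mitigation_temp_id_for_dest_entry(dst_entry_name, default_mitigation_template_name, mitigation_template_list):
--     """
--     Returns the id of the mitigation template based on destination entry name.
--     Returns customer default mitigation template if no match is found.
--     Mitigation templates are linked to destination entries based on naming conventions.
--     """
--     mitigation_template_id = ""
--     default_mitigation_template_id = ""
--
--     for each_mit_temp in mitigation_template_list["mitigation_template_list"]:
--         if each_mit_temp["name"] == "mit-temp-" + str(dst_entry_name):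
--             mitigation_template_id = each_mit_temp["id"]
--
--         if each_mit_temp["name"] == str(default_mitigation_template_name):
--             default_mitigation_template_id = each_mit_temp["id"]
--
--     if mitigation_template_id == "":
--         return default_mitigation_template_id
--     else:
--         return mitigation_template_id
-- ===== SOURCE B (Python) =====
-- def find_mitigation_temp_id_for_dest_entry(dst_entry_name, default_mitigation_template_name, mitigation_template_list):
--     """Search backwards with early exit: the first match from the end is A's
--     last-wins match. Second scan (for the default template) only runs if the
--     first yields the empty sentinel, exactly like A's final == "" test."""
--     entries = mitigation_template_list["mitigation_template_list"]
--
--     def last_id(name):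
--         for e in reversed(entries):
--             if e["name"] == name:
--                 return e["id"]
--         return ""
--
--     mid = last_id("mit-temp-" + str(dst_entry_name))
--     return last_id(str(default_mitigation_template_name)) if mid == "" else mid
-- ===== Notes on version B (the rewrite author's own statement) =====
-- stated objective: alternative
-- what changed: Replaces A's single forward fold carrying two sentinel accumulators by two staged backward searches with early exit (first match from the end = A's last overwrite), the second scan running only when the first returns the empty sentinel.
-- outside the precondition, e.g. on find_mitigation_temp_id_for_dest_entry('x', 'd', {'mitigation_template_list': [{'name': 'd'}]}): A raises KeyError, B raises KeyError
import Mathlib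
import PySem

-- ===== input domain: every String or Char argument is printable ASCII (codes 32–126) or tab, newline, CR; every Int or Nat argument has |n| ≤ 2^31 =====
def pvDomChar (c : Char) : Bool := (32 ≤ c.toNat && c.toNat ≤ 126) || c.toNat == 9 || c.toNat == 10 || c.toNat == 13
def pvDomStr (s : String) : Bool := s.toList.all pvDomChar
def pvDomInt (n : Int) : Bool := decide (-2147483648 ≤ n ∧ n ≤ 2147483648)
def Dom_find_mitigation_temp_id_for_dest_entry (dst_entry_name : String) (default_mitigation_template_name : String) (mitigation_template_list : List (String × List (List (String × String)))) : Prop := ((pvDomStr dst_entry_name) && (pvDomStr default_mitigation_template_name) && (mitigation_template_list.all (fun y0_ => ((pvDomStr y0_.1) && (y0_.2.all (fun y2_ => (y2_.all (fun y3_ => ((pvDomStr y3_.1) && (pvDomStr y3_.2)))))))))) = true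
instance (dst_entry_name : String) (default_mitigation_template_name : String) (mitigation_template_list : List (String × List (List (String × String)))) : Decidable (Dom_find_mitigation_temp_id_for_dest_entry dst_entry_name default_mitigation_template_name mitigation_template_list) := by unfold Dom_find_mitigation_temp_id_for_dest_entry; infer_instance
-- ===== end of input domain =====

-- B replaces A's single forward fold with two sentinel accumulators by two staged
-- backward early-exit searches (first match from the end = A's last overwrite);
-- objective: alternative decomposition, same cost.

-- ===== PORT A =====
-- loop state is the pair (mitigation_template_id, default_mitigation_template_id)
def find_mitigation_temp_id_for_dest_entry (dst_entry_name : String) (default_mitigation_template_name : String) (mitigation_template_list : List (String × List (List (String × String)))) : String :=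
  let entries := ((PySem.Dict.mk mitigation_template_list).get? "mitigation_template_list").getD []
  let p := entries.foldl (fun (p : String × String) e =>
      ( if ((PySem.Dict.mk e).get? "name").getD "" = "mit-temp-" ++ dst_entry_name
          then ((PySem.Dict.mk e).get? "id").getD "" else p.1,
        if ((PySem.Dict.mk e).get? "name").getD "" = default_mitigation_template_name
          then ((PySem.Dict.mk e).get? "id").getD "" else p.2)) ("", "")
  if p.1 = "" then p.2 else p.1

-- ===== PORT B =====
-- Source B's inner `last_id`: early-exit scan of the reversed entry list
def pvLastId (name : String) : List (List (String × String)) → String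
  | [] => ""
  | e :: rest =>
      if ((PySem.Dict.mk e).get? "name").getD "" = name
        then ((PySem.Dict.mk e).get? "id").getD ""
        else pvLastId name rest

def find_mitigation_temp_id_for_dest_entry_alt (dst_entry_name : String) (default_mitigation_template_name : String) (mitigation_template_list : List (String × List (List (String × String)))) : String :=
  let entries := ((PySem.Dict.mk mitigation_template_list).get? "mitigation_template_list").getD []
  let mid := pvLastId ("mit-temp-" ++ dst_entry_name) entries.reverse
  if mid = "" then pvLastId default_mitigation_template_name entries.reverse else mid

-- ===== PRECONDITION & SPEC =====
-- Pre_ excludes exactly the inputs where Python A raises KeyError: a missing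
-- "mitigation_template_list" key, an entry dict lacking "name", or a matching
-- entry (name equal to either looked-up name) lacking "id".
def Pre_find_mitigation_temp_id_for_dest_entry (dst_entry_name : String) (default_mitigation_template_name : String) (mitigation_template_list : List (String × List (List (String × String)))) : Prop :=
  (PySem.Dict.mk mitigation_template_list).contains "mitigation_template_list" = true ∧
  (((PySem.Dict.mk mitigation_template_list).get? "mitigation_template_list").getD []).all
    (fun e => (PySem.Dict.mk e).contains "name" &&
      (!(((PySem.Dict.mk e).get? "name").getD "" == "mit-temp-" ++ dst_entry_name
         || ((PySem.Dict.mk e).get? "name").getD "" == default_mitigation_template_name)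
       || (PySem.Dict.mk e).contains "id")) = true
instance (dst_entry_name : String) (default_mitigation_template_name : String) (mitigation_template_list : List (String × List (List (String × String)))) : Decidable (Pre_find_mitigation_temp_id_for_dest_entry dst_entry_name default_mitigation_template_name mitigation_template_list) := by unfold Pre_find_mitigation_temp_id_for_dest_entry; infer_instance

def pvWitness_find_mitigation_temp_id_for_dest_entry : String × String × (List (String × List (List (String × String)))) :=
  ("web", "mit-temp-default", [("mitigation_template_list", [[("name", "mit-temp-web"), ("id", "7")]])])

def Spec_find_mitigation_temp_id_for_dest_entry (dst_entry_name : String) (default_mitigation_template_name : String) (mitigation_template_list : List (String × List (List (String × String)))) (out : String) : Prop := out = find_mitigation_temp_id_for_dest_entry_alt dst_entry_name default_mitigation_template_name mitigation_template_list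
instance (dst_entry_name : String) (default_mitigation_template_name : String) (mitigation_template_list : List (String × List (List (String × String)))) (out : String) : Decidable (Spec_find_mitigation_temp_id_for_dest_entry dst_entry_name default_mitigation_template_name mitigation_template_list out) := by unfold Spec_find_mitigation_temp_id_for_dest_entry; infer_instance

-- ===== CLAIM (what is proved, stated in full; the proofs are below) =====
def Claim_equal_find_mitigation_temp_id_for_dest_entry : Prop := ∀ (dst_entry_name : String) (default_mitigation_template_name : String) (mitigation_template_list : List (String × List (List (String × String)))), Dom_find_mitigation_temp_id_for_dest_entry dst_entry_name default_mitigation_template_name mitigation_template_list → Pre_find_mitigation_temp_id_for_dest_entry dst_entry_name default_mitigation_template_name mitigation_template_list → Spec_find_mitigation_temp_id_for_dest_entry dst_entry_name default_mitigation_template_name mitigation_template_list (find_mitigation_temp_id_for_dest_entry dst_entry_name default_mitigation_template_name mitigation_template_list)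

-- ===== LEMMAS AND PROOFS =====

-- a fold carrying an independent pair of accumulators splits into two folds
theorem foldl_pair_split {E : Type} (f g : E → String → String) (l : List E) (a b : String) :
    l.foldl (fun (p : String × String) e => (f e p.1, g e p.2)) (a, b)
      = (l.foldl (fun x e => f e x) a, l.foldl (fun x e => g e x) b) := by
  induction l generalizing a b with
  | nil => rfl
  | cons h t ih => simpa using ih (f h a) (g h b)

-- A's last-wins fold from "" equals B's first-match-from-the-end scan
theorem foldl_lastwins_eq_scan_reverse (name : String) (l : List (List (String × String))) :
    l.foldl (fun x e => if ((PySem.Dict.mk e).get? "name").getD "" = name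
                          then ((PySem.Dict.mk e).get? "id").getD "" else x) ""
      = pvLastId name l.reverse := by
  induction l using List.reverseRecOn with
  | nil => rfl
  | append_singleton l' a ih =>
    rw [List.foldl_append, List.reverse_append]
    simp only [List.foldl, List.reverse_singleton, List.singleton_append, pvLastId]
    by_cases h : ((PySem.Dict.mk a).get? "name").getD "" = name
    · simp [h]
    · simp [h, ih]

theorem find_mitigation_temp_id_for_dest_entry_spec : Claim_equal_find_mitigation_temp_id_for_dest_entry := by
  intro dst dflt lst _ _
  unfold Spec_find_mitigation_temp_id_for_dest_entry
  unfold find_mitigation_temp_id_for_dest_entry find_mitigation_temp_id_for_dest_entry_alt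
  simp only [foldl_pair_split, foldl_lastwins_eq_scan_reverse]
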